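-- pv_equiv track=rewrite | github.com/ShrikarSwami/CS115-Programming-Assignments | Labs/lab11/lab11.py | count_shared_values
-- ===== SOURCE A (Python) =====
-- def count_shared_values(gridX, gridY):
--     setX = set() # Initialize an empty set to store unique values from gridX
--     for row in gridX: # Iterate through each row in gridX
--         for value in row: # Iterate through each value in the row
--             setX.add(value) # Add the value to the set
--     SetY = set() # Initialize an empty set to store unique values from gridY
--     for row in gridY: # Iterate through each row in gridY
--         for value in row: # Iterate through each value in the row
--             SetY.add(value) # Add the value to the set
--     shared_values = setX.intersection(SetY) # Find the intersection of the two sets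
--     return len(shared_values) # Return the count of shared values
-- ===== SOURCE B (Python) =====
-- def count_shared_values(gridX, gridY):
--     xs = sorted(v for row in gridX for v in row)
--     ys = sorted(v for row in gridY for v in row)
--     i = j = count = 0
--     nx, ny = len(xs), len(ys)
--     while i < nx and j < ny:
--         if xs[i] < ys[j]:
--             i += 1
--         elif ys[j] < xs[i]:
--             j += 1
--         else:
--             v = xs[i]
--             count += 1
--             while i < nx and xs[i] == v:
--                 i += 1
--             while j < ny and ys[j] == v:
--                 j += 1
--     return count
-- ===== Notes on version B (the rewrite author's own statement) =====
-- stated objective: alternative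
-- what changed: Instead of building two hash sets and intersecting them, B flattens and sorts both grids and counts shared distinct values with a single two-pointer merge scan over the two sorted lists, skipping runs of duplicates.
import Mathlib
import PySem

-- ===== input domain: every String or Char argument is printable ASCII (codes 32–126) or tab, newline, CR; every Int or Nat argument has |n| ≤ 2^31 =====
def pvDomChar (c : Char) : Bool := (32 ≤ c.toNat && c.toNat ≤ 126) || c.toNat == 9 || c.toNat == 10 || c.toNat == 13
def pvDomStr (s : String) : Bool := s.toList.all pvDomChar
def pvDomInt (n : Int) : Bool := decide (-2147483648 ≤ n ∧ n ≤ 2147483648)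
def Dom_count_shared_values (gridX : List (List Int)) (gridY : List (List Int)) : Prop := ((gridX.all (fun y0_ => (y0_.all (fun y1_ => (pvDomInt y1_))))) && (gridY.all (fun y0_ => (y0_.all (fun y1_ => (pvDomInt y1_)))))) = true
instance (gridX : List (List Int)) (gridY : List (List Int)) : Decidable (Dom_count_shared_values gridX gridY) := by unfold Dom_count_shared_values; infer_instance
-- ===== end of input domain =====

-- B replaces A's two hash sets + intersection by sorting both flattened grids and counting the
-- shared distinct values in one two-pointer merge scan (objective: alternative).

-- ===== PORT A =====
def count_shared_values (gridX : List (List Int)) (gridY : List (List Int)) : Int :=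
  let setX := gridX.foldl (fun s row => row.foldl (fun s v => PySem.Set.add s v) s)
    (PySem.Set.empty : PySem.Set Int)
  let setY := gridY.foldl (fun s row => row.foldl (fun s v => PySem.Set.add s v) s)
    (PySem.Set.empty : PySem.Set Int)
  let shared := PySem.Set.inter setX setY
  PySem.Set.len shared

-- ===== PORT B =====
-- Source B's while-loop over indices i, j: the two pointers become the two list suffixes; the inner
-- duplicate-skipping while-loops become dropWhile on the suffix.
def csvMergeCount : List Int → List Int → Int
  | [], _ => 0
  | _ :: _, [] => 0
  | x :: xs, y :: ys =>
    if x < y then csvMergeCount xs (y :: ys)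
    else if y < x then csvMergeCount (x :: xs) ys
    else 1 + csvMergeCount (xs.dropWhile (· == x)) (ys.dropWhile (· == x))
termination_by a b => a.length + b.length
decreasing_by
  · simp
  · simp
  · have h1 := List.length_dropWhile_le (· == x) xs
    have h2 := List.length_dropWhile_le (· == x) ys
    simp at *; omega

def count_shared_values_alt (gridX : List (List Int)) (gridY : List (List Int)) : Int :=
  let xs := PySem.List.sorted gridX.flatten (fun v => v) false
  let ys := PySem.List.sorted gridY.flatten (fun v => v) false
  csvMergeCount xs ys

-- ===== PRECONDITION & SPEC =====
def Spec_count_shared_values (gridX : List (List Int)) (gridY : List (List Int)) (out : Int) : Prop := out = count_shared_values_alt gridX gridY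
instance (gridX : List (List Int)) (gridY : List (List Int)) (out : Int) : Decidable (Spec_count_shared_values gridX gridY out) := by unfold Spec_count_shared_values; infer_instance

-- ===== CLAIM (what is proved, stated in full; the proofs are below) =====
def Claim_equal_count_shared_values : Prop := ∀ (gridX : List (List Int)) (gridY : List (List Int)), Dom_count_shared_values gridX gridY → Spec_count_shared_values gridX gridY (count_shared_values gridX gridY)

-- ===== LEMMAS AND PROOFS =====

-- Dropping the leading run of copies of x does not change the set 'insert x {rest}'.
lemma insert_toFinset_dropWhile (x : Int) (xs : List Int) :
    insert x (xs.dropWhile (· == x)).toFinset = insert x xs.toFinset := by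
  induction xs with
  | nil => simp
  | cons a t ih =>
    by_cases ha : a = x
    · subst ha
      simp only [List.dropWhile_cons, beq_self_eq_true]
      simp [ih]
    · simp [ha]

-- In a ≤-sorted list x :: xs, the suffix after the leading run of x's contains no x.
lemma notMem_dropWhile_of_sorted (x : Int) (xs : List Int)
    (h : (x :: xs).Pairwise (· ≤ ·)) : x ∉ xs.dropWhile (· == x) := by
  induction xs with
  | nil => simp
  | cons a t ih =>
    rcases List.pairwise_cons.mp h with ⟨hx, hat⟩
    by_cases ha : a = x
    · subst ha
      have hsort : (a :: t).Pairwise (· ≤ ·) := by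
        rw [List.pairwise_cons]
        exact ⟨fun e he => List.rel_of_pairwise_cons hat he, (List.pairwise_cons.mp hat).2⟩
      have hd : (a :: t).dropWhile (· == a) = t.dropWhile (· == a) := by simp
      rw [hd]
      exact ih hsort
    · have hxa : x < a := lt_of_le_of_ne (hx a (by simp)) (fun h' => ha h'.symm)
      have hd : (a :: t).dropWhile (· == x) = a :: t := by
        rw [List.dropWhile_cons]; simp [ha]
      rw [hd]
      intro hmem
      rcases List.mem_cons.mp hmem with rfl | hmt
      · exact absurd rfl (ne_of_gt hxa)
      · exact absurd (List.rel_of_pairwise_cons hat hmt) (not_le.mpr hxa)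

-- The merge scan of two ≤-sorted lists counts the distinct shared values.
lemma csvMergeCount_eq_card (xs ys : List Int)
    (hx : xs.Pairwise (· ≤ ·)) (hy : ys.Pairwise (· ≤ ·)) :
    csvMergeCount xs ys = ((xs.toFinset ∩ ys.toFinset).card : Int) := by
  induction xs, ys using csvMergeCount.induct with
  | case1 ys => simp [csvMergeCount]
  | case2 x xs => simp [csvMergeCount]
  | case3 x xs y ys hlt ih =>
    have hx' := (List.pairwise_cons.mp hx).2
    have hxy : x ∉ (y :: ys).toFinset := by
      simp only [List.mem_toFinset]
      intro hmem
      rcases List.mem_cons.mp hmem with rfl | hm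
      · exact absurd hlt (lt_irrefl _)
      · exact absurd (List.rel_of_pairwise_cons hy hm) (not_le.mpr hlt)
    have hset : (x :: xs).toFinset ∩ (y :: ys).toFinset = xs.toFinset ∩ (y :: ys).toFinset := by
      rw [List.toFinset_cons, Finset.insert_inter_of_notMem hxy]
    rw [csvMergeCount, if_pos hlt, ih hx' hy, hset]
  | case4 x xs y ys hlt hgt ih =>
    have hy' := (List.pairwise_cons.mp hy).2
    have hyx : y ∉ (x :: xs).toFinset := by
      simp only [List.mem_toFinset]
      intro hmem
      rcases List.mem_cons.mp hmem with rfl | hm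
      · exact absurd hgt (lt_irrefl _)
      · exact absurd (List.rel_of_pairwise_cons hx hm) (not_le.mpr hgt)
    have hset : (x :: xs).toFinset ∩ (y :: ys).toFinset = (x :: xs).toFinset ∩ ys.toFinset := by
      rw [List.toFinset_cons (a := y), Finset.inter_insert_of_notMem hyx]
    rw [csvMergeCount, if_neg hlt, if_pos hgt, ih hx hy', hset]
  | case5 x xs y ys hlt hgt ih =>
    have hxy : x = y := le_antisymm (not_lt.mp hgt) (not_lt.mp hlt)
    subst hxy
    have hxs' : (xs.dropWhile (· == x)).Pairwise (· ≤ ·) :=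
      ((List.pairwise_cons.mp hx).2).sublist (List.dropWhile_sublist _)
    have hys' : (ys.dropWhile (· == x)).Pairwise (· ≤ ·) :=
      ((List.pairwise_cons.mp hy).2).sublist (List.dropWhile_sublist _)
    rw [csvMergeCount, if_neg hlt, if_neg hgt, ih hxs' hys']
    have h1 : x ∉ (xs.dropWhile (· == x)).toFinset := by
      simpa using notMem_dropWhile_of_sorted x xs hx
    have h2 : x ∉ (ys.dropWhile (· == x)).toFinset := by
      simpa using notMem_dropWhile_of_sorted x ys hy
    have hfin : (x :: xs).toFinset ∩ (x :: ys).toFinset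
        = insert x ((xs.dropWhile (· == x)).toFinset ∩ (ys.dropWhile (· == x)).toFinset) := by
      simp only [List.toFinset_cons]
      rw [← insert_toFinset_dropWhile x xs, ← insert_toFinset_dropWhile x ys,
        ← Finset.insert_inter_distrib]
    rw [hfin, Finset.card_insert_of_notMem (by simp [h1, h2])]
    push_cast
    ring

-- A's two nested loops build set(flatten).
lemma setA_eq_ofList (g : List (List Int)) :
    g.foldl (fun s row => row.foldl (fun s v => PySem.Set.add s v) s)
      (PySem.Set.empty : PySem.Set Int) = PySem.Set.ofList g.flatten := by
  rw [← List.foldl_flatten]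
  rfl

-- A's result is the cardinality of the intersection of the two value sets.
lemma count_A_eq_card (X Y : List Int) :
    PySem.Set.len (PySem.Set.inter (PySem.Set.ofList X) (PySem.Set.ofList Y))
      = ((X.toFinset ∩ Y.toFinset).card : Int) := by
  show (((PySem.Set.ofList X).filter
    (fun x => PySem.Set.contains (PySem.Set.ofList Y) x)).length : Int) = _
  have hnodup : ((PySem.Set.ofList X).filter
      (fun x => PySem.Set.contains (PySem.Set.ofList Y) x)).Nodup :=
    (PySem.Set.nodup_ofList X).filter _
  rw [← List.toFinset_card_of_nodup hnodup]
  congr 2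
  ext k
  simp only [List.mem_toFinset, List.mem_filter, Finset.mem_inter,
    PySem.Set.mem_ofList]
  constructor
  · rintro ⟨hkX, hkY⟩
    refine ⟨hkX, ?_⟩
    simpa [PySem.Set.contains, PySem.Set.mem_ofList] using hkY
  · rintro ⟨hkX, hkY⟩
    exact ⟨hkX, by simpa [PySem.Set.contains, PySem.Set.mem_ofList] using hkY⟩

theorem count_shared_values_eq_aux (gridX gridY : List (List Int)) :
    count_shared_values gridX gridY = count_shared_values_alt gridX gridY := by
  unfold count_shared_values count_shared_values_alt
  rw [setA_eq_ofList, setA_eq_ofList, count_A_eq_card]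
  rw [csvMergeCount_eq_card _ _
    (by simpa using PySem.List.sorted_pairwise gridX.flatten (fun v => v))
    (by simpa using PySem.List.sorted_pairwise gridY.flatten (fun v => v))]
  rw [List.toFinset_eq_of_perm _ _ (PySem.List.sorted_perm gridX.flatten (fun v => v) false),
    List.toFinset_eq_of_perm _ _ (PySem.List.sorted_perm gridY.flatten (fun v => v) false)]

-- ===== VERDICT (by name: the statement is the Claim_ definition above) =====
theorem count_shared_values_spec : Claim_equal_count_shared_values := by
  intro gridX gridY _
  exact count_shared_values_eq_aux gridX gridY
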